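-- pv_equiv track=rewrite | github.com/gabriel-peter/CS3000 | hw3/2.py | FindOpt
-- ===== SOURCE A (Python) =====
-- S = 15
--
-- def FindOpt(M_C, M_B, n, current_team):
--     if n == 0:
--         return []
--     celtics_choice = M_C[n]
--     bruins_choice = M_B[n]
--     if current_team == 'Celtics':
--         bruins_choice = M_B[n] - S
--     else:
--         celtics_choice = M_C[n] - S
--     if celtics_choice > bruins_choice:
--         return FindOpt(M_C, M_B, n-1, 'Celtics') + ['Celtics']
--     else:
--         return FindOpt(M_C, M_B, n-1, 'Bruins') + ['Bruins']
-- ===== SOURCE B (Python) =====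
-- S = 15
--
-- def FindOpt(M_C, M_B, n, current_team):
--     # Iterative single pass from level n down to 1, propagating the chosen
--     # team forward, then reverse once: O(n) instead of O(n^2) concatenations.
--     out = []
--     team = current_team
--     k = n
--     while k > 0:
--         c = M_C[k]
--         b = M_B[k]
--         if team == 'Celtics':
--             b -= S
--         else:
--             c -= S
--         team = 'Celtics' if c > b else 'Bruins'
--         out.append(team)
--         k -= 1
--     out.reverse()
--     return out
-- ===== Notes on version B (the rewrite author's own statement) =====
-- stated objective: faster
-- what changed: Replaced the recursion that rebuilds the result with '+' at every level by an iterative single pass from level n down to 1 that propagates the chosen team and appends to one list, reversed once at the end.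
import Mathlib
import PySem

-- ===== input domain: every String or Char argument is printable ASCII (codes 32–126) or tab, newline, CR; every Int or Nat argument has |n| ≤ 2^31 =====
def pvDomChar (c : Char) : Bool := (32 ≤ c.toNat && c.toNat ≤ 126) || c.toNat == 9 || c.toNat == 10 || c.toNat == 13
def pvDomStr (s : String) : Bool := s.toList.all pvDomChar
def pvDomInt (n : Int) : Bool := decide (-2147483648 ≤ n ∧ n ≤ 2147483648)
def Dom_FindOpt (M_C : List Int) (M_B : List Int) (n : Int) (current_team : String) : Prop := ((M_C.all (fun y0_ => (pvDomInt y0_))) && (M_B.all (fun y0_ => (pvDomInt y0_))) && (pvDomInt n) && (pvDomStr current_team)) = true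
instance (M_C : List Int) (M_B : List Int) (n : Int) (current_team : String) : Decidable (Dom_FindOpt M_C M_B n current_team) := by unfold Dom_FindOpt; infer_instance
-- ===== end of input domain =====

-- B replaces A's O(n^2) recursion (list concatenation at every level) by an O(n) iterative
-- pass from level n down to 1, appending to one list that is reversed once at the end.

-- ===== PORT A =====
-- Literal port of A's recursion; the `| _, _ => []` branches are the IndexError
-- cases, excluded by Pre_FindOpt.
def FindOpt (M_C : List Int) (M_B : List Int) (n : Int) (current_team : String) : List String :=
  if n = 0 then []
  else
    match hc : PySem.List.pyGet? M_C n with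
    | none => []  -- IndexError
    | some celtics_choice0 =>
      match PySem.List.pyGet? M_B n with
      | none => []  -- IndexError
      | some bruins_choice0 =>
        let celtics_choice := if current_team == "Celtics" then celtics_choice0 else celtics_choice0 - 15
        let bruins_choice := if current_team == "Celtics" then bruins_choice0 - 15 else bruins_choice0
        if celtics_choice > bruins_choice then
          FindOpt M_C M_B (n - 1) "Celtics" ++ ["Celtics"]
        else
          FindOpt M_C M_B (n - 1) "Bruins" ++ ["Bruins"]
termination_by (n + M_C.length + 1).toNat
decreasing_by
  all_goals
    · have h : ¬ (PySem.List.pyGet? M_C n = none) := by simp [hc]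
      rw [PySem.List.pyGet?_eq_none_iff] at h
      have := not_not.mp h
      unfold PySem.Raise.InRange at this
      omega

-- ===== PORT B =====
-- Port of Source B's while loop: state (team, out); the loop counts k = n, n-1, ..., 1,
-- so it is transcribed as structural recursion on the (nonnegative) count n.toNat.
def FindOptAltLoop (M_C : List Int) (M_B : List Int) : Nat → String → List String → List String
  | 0, _, out => out
  | k + 1, team, out =>
    match PySem.List.pyGet? M_C ((k + 1 : Nat) : Int) with
    | none => out  -- IndexError
    | some c0 =>
      match PySem.List.pyGet? M_B ((k + 1 : Nat) : Int) with
      | none => out  -- IndexError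
      | some b0 =>
        let b := if team == "Celtics" then b0 - 15 else b0
        let c := if team == "Celtics" then c0 else c0 - 15
        let t := if c > b then "Celtics" else "Bruins"
        FindOptAltLoop M_C M_B k t (out ++ [t])

def FindOpt_alt (M_C : List Int) (M_B : List Int) (n : Int) (current_team : String) : List String :=
  (FindOptAltLoop M_C M_B n.toNat current_team []).reverse

-- ===== PRECONDITION & SPEC =====
-- Exactly the inputs on which A returns without IndexError: n must be nonnegative
-- (A recurses past the front of the lists otherwise) and, when n > 0, the indexed
-- levels n..1 must be in range, i.e. n < len(M_C) and n < len(M_B).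
def Pre_FindOpt (M_C : List Int) (M_B : List Int) (n : Int) (current_team : String) : Prop :=
  0 ≤ n ∧ (0 < n → n < M_C.length ∧ n < M_B.length)
instance (M_C : List Int) (M_B : List Int) (n : Int) (current_team : String) : Decidable (Pre_FindOpt M_C M_B n current_team) := by unfold Pre_FindOpt; infer_instance

def pvWitness_FindOpt : List Int × List Int × Int × String := ([0, 3, 10, 2], [0, 5, 1, 9], 3, "Celtics")

def Spec_FindOpt (M_C : List Int) (M_B : List Int) (n : Int) (current_team : String) (out : List String) : Prop := out = FindOpt_alt M_C M_B n current_team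
instance (M_C : List Int) (M_B : List Int) (n : Int) (current_team : String) (out : List String) : Decidable (Spec_FindOpt M_C M_B n current_team out) := by unfold Spec_FindOpt; infer_instance

-- ===== CLAIM (what is proved, stated in full; the proofs are below) =====
def Claim_equal_FindOpt : Prop := ∀ (M_C : List Int) (M_B : List Int) (n : Int) (current_team : String), Dom_FindOpt M_C M_B n current_team → Pre_FindOpt M_C M_B n current_team → Spec_FindOpt M_C M_B n current_team (FindOpt M_C M_B n current_team)
-- ===== LEMMAS AND PROOFS =====

-- The loop's accumulator factors out: running it with accumulator `out` appends
-- its own contribution to `out`.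
theorem findOptAltLoop_acc (M_C M_B : List Int) : ∀ (k : Nat) (team : String) (out : List String),
    FindOptAltLoop M_C M_B k team out = out ++ FindOptAltLoop M_C M_B k team [] := by
  intro k
  induction k with
  | zero => intro team out; simp [FindOptAltLoop]
  | succ k ih =>
    intro team out
    rw [FindOptAltLoop, FindOptAltLoop]
    cases hc : PySem.List.pyGet? M_C ((k + 1 : Nat) : Int) with
    | none => simp
    | some c0 =>
      cases hb : PySem.List.pyGet? M_B ((k + 1 : Nat) : Int) with
      | none => simp
      | some b0 =>
        simp only []
        rw [ih]
        conv_rhs => rw [ih]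
        simp

theorem findOpt_eq_loop (M_C M_B : List Int) : ∀ (m : Nat) (team : String),
    (0 < m → (m : Int) < M_C.length ∧ (m : Int) < M_B.length) →
    FindOpt M_C M_B (m : Int) team = (FindOptAltLoop M_C M_B m team []).reverse := by
  intro m
  induction m with
  | zero =>
    intro team _
    rw [FindOpt]
    simp [FindOptAltLoop]
  | succ m ih =>
    intro team hCB
    obtain ⟨hC, hB⟩ := hCB (by omega)
    have hn0 : ((m + 1 : Nat) : Int) ≠ 0 := by omega
    rw [FindOpt, FindOptAltLoop]
    simp only [hn0, if_false]
    cases hc : PySem.List.pyGet? M_C ((m + 1 : Nat) : Int) with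
    | none =>
      exfalso
      rw [PySem.List.pyGet?_eq_none_iff] at hc
      exact hc (by unfold PySem.Raise.InRange; omega)
    | some c0 =>
      cases hb : PySem.List.pyGet? M_B ((m + 1 : Nat) : Int) with
      | none =>
        exfalso
        rw [PySem.List.pyGet?_eq_none_iff] at hb
        exact hb (by unfold PySem.Raise.InRange; omega)
      | some b0 =>
        simp only []
        have hsub : ((m + 1 : Nat) : Int) - 1 = (m : Int) := by omega
        by_cases hgt : (if team == "Celtics" then c0 else c0 - 15) > (if team == "Celtics" then b0 - 15 else b0)
        · simp only [hgt, if_true]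
          rw [hsub, findOptAltLoop_acc, ih "Celtics" (fun h => ⟨by omega, by omega⟩)]
          simp
        · simp only [hgt, if_false]
          rw [hsub, findOptAltLoop_acc, ih "Bruins" (fun h => ⟨by omega, by omega⟩)]
          simp

-- ===== VERDICT (by name: the statement is the Claim_ definition above) =====
theorem FindOpt_spec : Claim_equal_FindOpt := by
  intro M_C M_B n current_team _ hpre
  obtain ⟨h0, hCB⟩ := hpre
  obtain ⟨m, rfl⟩ := Int.eq_ofNat_of_zero_le h0
  unfold Spec_FindOpt FindOpt_alt
  rw [Int.toNat_natCast]
  exact findOpt_eq_loop M_C M_B m current_team (fun h => hCB (by omega))
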